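-- pv_equiv track=rewrite | github.com/splitkeyboard2024/split-kb-task | lines.py | parse
-- ===== SOURCE A (Python) =====
-- def parse(input):
--     res = []
--     N = 5
--     strip_s = ''.join(filter(lambda x: str.isalnum(x) or x == ' ' or x == '\n', input.strip()))
--     # strip_s = input
--     words = strip_s.split()
--     for i in range(0, len(words), N):
--         res.append(', '.join(words[i:i+N]))
--     return '\n'.join(res)
-- ===== SOURCE B (Python) =====
-- def parse(input):
--     strip_s = ''.join(filter(lambda x: str.isalnum(x) or x == ' ' or x == '\n', input.strip()))
--     res = []
--     buf = []
--     for w in strip_s.split():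
--         buf.append(w)
--         if len(buf) == 5:
--             res.append(', '.join(buf))
--             buf = []
--     if buf:
--         res.append(', '.join(buf))
--     return '\n'.join(res)
-- ===== Notes on version B (the rewrite author's own statement) =====
-- stated objective: alternative
-- what changed: Replaces A's index arithmetic (range(0, len(words), 5) with slicing words[i:i+5]) by a single pass over the words that maintains a running 5-word buffer flushed into the result when full, with a final flush of the partial group.
import Mathlib
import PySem

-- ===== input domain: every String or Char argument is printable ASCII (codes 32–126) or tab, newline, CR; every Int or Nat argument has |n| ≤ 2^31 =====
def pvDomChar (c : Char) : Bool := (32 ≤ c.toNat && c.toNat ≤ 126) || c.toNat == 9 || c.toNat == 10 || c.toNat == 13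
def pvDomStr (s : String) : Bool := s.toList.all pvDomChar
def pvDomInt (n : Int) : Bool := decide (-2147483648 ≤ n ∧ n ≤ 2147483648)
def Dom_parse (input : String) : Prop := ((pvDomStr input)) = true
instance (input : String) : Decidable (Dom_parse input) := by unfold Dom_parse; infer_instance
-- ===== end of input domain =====

-- B replaces A's stepping range/slice chunking by a single pass with a running 5-word buffer (alternative decomposition, same cost).

-- ===== PORT A =====
def parse (input : String) : String :=
  let N : Int := 5
  let strip_s : List Char := (PySem.Chars.strip input.toList).filter
      (fun x => PySem.Chars.isalnum x || x == ' ' || x == '\n')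
  let words : List (List Char) := PySem.Chars.split₀ strip_s
  let res : List (List Char) :=
    (PySem.List.pyRange 0 (words.length : Int) N).foldl
      (fun res i => res ++ [PySem.Chars.join ", ".toList (PySem.List.slice words (some i) (some (i + N)))]) []
  String.ofList (PySem.Chars.join "\n".toList res)

-- ===== PORT B =====
def parse_alt (input : String) : String :=
  let strip_s : List Char := (PySem.Chars.strip input.toList).filter
      (fun x => PySem.Chars.isalnum x || x == ' ' || x == '\n')
  let words : List (List Char) := PySem.Chars.split₀ strip_s
  let st : List (List Char) × List (List Char) := words.foldl
      (fun st w =>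
        let buf := st.2 ++ [w]
        if buf.length == 5 then (st.1 ++ [PySem.Chars.join ", ".toList buf], [])
        else (st.1, buf)) ([], [])
  let res : List (List Char) :=
    if st.2 ≠ [] then st.1 ++ [PySem.Chars.join ", ".toList st.2] else st.1
  String.ofList (PySem.Chars.join "\n".toList res)

-- ===== PRECONDITION & SPEC =====
def Spec_parse (input : String) (out : String) : Prop := out = parse_alt input
instance (input : String) (out : String) : Decidable (Spec_parse input out) := by unfold Spec_parse; infer_instance

-- ===== CLAIM (what is proved, stated in full; the proofs are below) =====
def Claim_equal_parse : Prop := ∀ (input : String), Dom_parse input → Spec_parse input (parse input)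

-- ===== LEMMAS AND PROOFS =====

-- consecutive 5-element chunks of a list (proof-side specification both loops are reduced to)
def pvChunks5 {α : Type} (l : List α) : List (List α) :=
  if h : l = [] then [] else l.take 5 :: pvChunks5 (l.drop 5)
termination_by l.length
decreasing_by
  cases l with
  | nil => exact absurd rfl h
  | cons x xs => simp

-- B's loop step and final flush, named so the goals stay readable
def pvStep (sep : List Char) (st : List (List Char) × List (List Char)) (w : List Char) :
    List (List Char) × List (List Char) :=
  if (st.2 ++ [w]).length == 5 then (st.1 ++ [PySem.Chars.join sep (st.2 ++ [w])], [])
  else (st.1, st.2 ++ [w])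

def pvFinish (sep : List Char) (st : List (List Char) × List (List Char)) : List (List Char) :=
  if st.2 ≠ [] then st.1 ++ [PySem.Chars.join sep st.2] else st.1

theorem pv_foldl_concat_map {α β : Type} (l : List α) (f : α → β) (acc : List β) :
    l.foldl (fun a x => a ++ [f x]) acc = acc ++ l.map f := by
  induction l generalizing acc with
  | nil => simp
  | cons x xs ih => simp [List.foldl_cons, ih]

theorem pv_pyRange_five (n : Nat) :
    PySem.List.pyRange 0 (n : Int) 5 = (List.range ((n + 4) / 5)).map (fun (k : Nat) => ((0 : Int) + 5 * (k : Int))) := by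
  unfold PySem.List.pyRange
  simp only [if_neg (show ¬((5:Int) = 0) by norm_num), if_pos (show (0:Int) < 5 by norm_num)]
  have hcount : (if (0:Int) < (n:Int) then (((n:Int) - 0 + 5 - 1) / 5).toNat else 0) = (n + 4) / 5 := by
    rcases Nat.eq_zero_or_pos n with h | h
    · simp [h]
    · rw [if_pos (by exact_mod_cast h)]
      omega
  rw [hcount]

theorem pv_chunk_map {α β : Type} (ws : List α) (f : List α → β) :
    (List.range ((ws.length + 4) / 5)).map (fun k => f ((ws.drop (5 * k)).take 5))
      = (pvChunks5 ws).map f := by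
  rw [pvChunks5]
  by_cases h : ws = []
  · simp [h]
  · rw [dif_neg h]
    have hlen : 1 ≤ ws.length := List.length_pos_iff.mpr h
    have hc : (ws.length + 4) / 5 = ((ws.length - 5) + 4) / 5 + 1 := by omega
    rw [hc, List.range_succ_eq_map, List.map_cons, List.map_map, List.map_cons]
    have htail : List.map ((fun k => f (List.take 5 (List.drop (5 * k) ws))) ∘ Nat.succ)
        (List.range ((ws.length - 5 + 4) / 5)) = List.map f (pvChunks5 (List.drop 5 ws)) := by
      rw [← pv_chunk_map (ws.drop 5) f]
      simp only [List.length_drop]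
      apply List.map_congr_left
      intro k _
      simp only [Function.comp_apply, Nat.succ_eq_add_one]
      have he : List.drop (5 * k) (List.drop 5 ws) = List.drop (5 * (k + 1)) ws := by
        rw [List.drop_drop]; congr 1; omega
      rw [he]
    rw [htail]
    norm_num
termination_by ws.length
decreasing_by
  cases ws with
  | nil => exact absurd rfl h
  | cons x xs => simp

theorem pv_bloop (sep : List Char) (ws : List (List Char)) (res buf : List (List Char))
    (hbuf : buf.length < 5) :
    pvFinish sep (ws.foldl (pvStep sep) (res, buf))
      = res ++ (pvChunks5 (buf ++ ws)).map (PySem.Chars.join sep) := by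
  induction ws generalizing res buf with
  | nil =>
    by_cases hb : buf = []
    · subst hb; simp [pvFinish, pvChunks5]
    · have h1 : buf.take 5 = buf := List.take_of_length_le (by omega)
      have h2 : buf.drop 5 = [] := List.drop_eq_nil_of_le (by omega)
      simp only [List.foldl_nil, List.append_nil, pvFinish, if_pos hb]
      rw [pvChunks5, dif_neg hb, h1, h2, pvChunks5]
      simp
  | cons w ws ih =>
    simp only [List.foldl_cons]
    by_cases hfull : (buf ++ [w]).length = 5
    · have hstep : pvStep sep (res, buf) w = (res ++ [PySem.Chars.join sep (buf ++ [w])], []) := by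
        simp [pvStep, hfull]
      rw [hstep, ih _ [] (by norm_num), List.nil_append]
      have hchunk : pvChunks5 (buf ++ w :: ws) = (buf ++ [w]) :: pvChunks5 ws := by
        rw [show buf ++ w :: ws = (buf ++ [w]) ++ ws from by simp]
        rw [pvChunks5, dif_neg (by simp), ← hfull, List.take_left, List.drop_left]
      rw [hchunk]
      simp
    · have hlen : (buf ++ [w]).length = buf.length + 1 := by simp
      have hstep : pvStep sep (res, buf) w = (res, buf ++ [w]) := by
        simp only [pvStep]
        rw [if_neg (by simpa using hfull)]
      rw [hstep, ih _ _ (by omega)]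
      rw [show buf ++ [w] ++ ws = buf ++ w :: ws from by simp]

theorem pv_res_eq (words : List (List Char)) :
    (PySem.List.pyRange 0 (words.length : Int) 5).foldl
      (fun res i => res ++ [PySem.Chars.join ", ".toList (PySem.List.slice words (some i) (some (i + 5)))]) []
      = (fun st => if st.2 ≠ [] then st.1 ++ [PySem.Chars.join ", ".toList st.2] else st.1)
          (words.foldl
            (fun st w =>
              if (st.2 ++ [w]).length == 5 then (st.1 ++ [PySem.Chars.join ", ".toList (st.2 ++ [w])], [])
              else (st.1, st.2 ++ [w])) ([], [])) := by
  rw [pv_pyRange_five, List.foldl_map, pv_foldl_concat_map, List.nil_append]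
  rw [show (fun (st : List (List Char) × List (List Char)) (w : List Char) =>
        if (st.2 ++ [w]).length == 5 then (st.1 ++ [PySem.Chars.join ", ".toList (st.2 ++ [w])], [])
        else (st.1, st.2 ++ [w])) = pvStep ", ".toList from rfl]
  rw [show (fun (st : List (List Char) × List (List Char)) =>
        if st.2 ≠ [] then st.1 ++ [PySem.Chars.join ", ".toList st.2] else st.1) = pvFinish ", ".toList from rfl]
  have hb := pv_bloop ", ".toList words [] [] (by norm_num)
  simp only [List.nil_append] at hb
  rw [hb, ← pv_chunk_map words (PySem.Chars.join ", ".toList)]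
  apply List.map_congr_left
  intro k _
  rw [PySem.List.slice_toNat words (by omega) (by omega)]
  have h1 : ((0 : Int) + 5 * (k : Int)).toNat = 5 * k := by omega
  have h2 : ((0 : Int) + 5 * (k : Int) + 5).toNat = 5 * k + 5 := by omega
  rw [h1, h2]
  congr 2
  omega

-- ===== VERDICT (by name: the statement is the Claim_ definition above) =====
theorem parse_spec : Claim_equal_parse := by
  intro input _
  show parse input = parse_alt input
  simp only [parse, parse_alt]
  exact congrArg (fun r => String.ofList (PySem.Chars.join "\n".toList r)) (pv_res_eq _)
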